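-- pv_equiv track=rewrite | github.com/secary/chat-bi | backend/agent/executor.py | option_args
-- ===== SOURCE A (Python) =====
-- from typing import Any, Dict, List, Optional
--
-- def option_args(args: List[str]) -> List[str]:
--     kept: List[str] = []
--     i = 0
--     while i < len(args):
--         token = str(args[i])
--         if token.startswith("--"):
--             kept.append(token)
--             if i + 1 < len(args) and not str(args[i + 1]).startswith("--"):
--                 kept.append(str(args[i + 1]))
--                 i += 1
--         i += 1
--     return kept
-- ===== SOURCE B (Python) =====
-- from typing import List
--
--
-- def option_args(args: List[str]) -> List[str]:
--     kept: List[str] = []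
--     prev = None
--     for raw in args:
--         token = str(raw)
--         if token.startswith("--") or (prev is not None and str(prev).startswith("--")):
--             kept.append(token)
--         prev = raw
--     return kept
-- ===== Notes on version B (the rewrite author's own statement) =====
-- stated objective: simpler
-- what changed: Replaces the index-based while loop with look-ahead and index skipping by a single for loop that decides each token by looking back at the previous token (keep it if it is a flag or the previous token was a flag).
import Mathlib
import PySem

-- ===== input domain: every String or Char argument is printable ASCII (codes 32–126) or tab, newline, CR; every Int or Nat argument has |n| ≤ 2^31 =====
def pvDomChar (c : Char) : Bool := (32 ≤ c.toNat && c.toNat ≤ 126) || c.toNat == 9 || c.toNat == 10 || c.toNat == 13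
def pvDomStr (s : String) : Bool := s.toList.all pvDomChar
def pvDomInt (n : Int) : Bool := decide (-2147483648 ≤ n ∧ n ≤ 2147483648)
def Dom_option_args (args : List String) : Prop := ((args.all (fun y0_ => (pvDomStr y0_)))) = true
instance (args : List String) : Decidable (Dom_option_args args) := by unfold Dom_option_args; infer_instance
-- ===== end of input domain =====

-- B replaces A's index-based look-ahead/skip while loop by a single look-back pass (simpler).


-- ===== PORT A =====
-- A's while loop over the index is a loop over the remaining suffix of args:
-- flag token → keep it and, if the next token exists and is not a flag, keep it too and skip it.
def option_args (args : List String) : List String :=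
  match args with
  | [] => []
  | t :: rest =>
    if PySem.Str.startswith t "--" then
      match rest with
      | [] => t :: option_args []
      | v :: rest' =>
        if PySem.Str.startswith v "--" then t :: option_args (v :: rest')
        else t :: v :: option_args rest'
    else option_args rest

-- ===== PORT B =====
-- one forward pass; state = (kept so far, previous raw token)
def pvStepB (st : List String × Option String) (t : String) : List String × Option String :=
  ((if PySem.Str.startswith t "--"
       || (match st.2 with | some p => PySem.Str.startswith p "--" | none => false)
     then st.1 ++ [t] else st.1), some t)

def option_args_alt (args : List String) : List String :=
  (args.foldl pvStepB ([], none)).1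

-- ===== PRECONDITION & SPEC =====
def Spec_option_args (args : List String) (out : List String) : Prop := out = option_args_alt args
instance (args : List String) (out : List String) : Decidable (Spec_option_args args out) := by unfold Spec_option_args; infer_instance

-- ===== CLAIM (what is proved, stated in full; the proofs are below) =====
def Claim_equal_option_args : Prop := ∀ (args : List String), Dom_option_args args → Spec_option_args args (option_args args)

-- ===== LEMMAS AND PROOFS =====

-- what B emits from state 'prev' on the rest of the list
def pvB' : Option String → List String → List String
  | _, [] => []
  | prev, t :: rest =>
      (if PySem.Str.startswith t "--"
          || (match prev with | some p => PySem.Str.startswith p "--" | none => false)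
        then [t] else []) ++ pvB' (some t) rest

theorem pv_fold_eq (args : List String) : ∀ (acc : List String) (prev : Option String),
    (args.foldl pvStepB (acc, prev)).1 = acc ++ pvB' prev args := by
  induction args with
  | nil => intro acc prev; simp [pvB']
  | cons t rest ih =>
    intro acc prev
    simp only [List.foldl, pvStepB, pvB']
    rw [ih]
    cases prev <;> simp only [] <;> split <;> simp

-- combined induction: B' from a non-flag (or empty) context equals A; B' from a flag
-- context keeps the head unconditionally and then behaves like A.
theorem pv_key (args : List String) : ∀ (prev : Option String),
    ((match prev with | some p => PySem.Str.startswith p "--" | none => false) = false →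
      pvB' prev args = option_args args) ∧
    (∀ p, prev = some p → PySem.Str.startswith p "--" = true →
      pvB' prev args = (match args with
        | [] => []
        | t :: rest => if PySem.Str.startswith t "--" then option_args (t :: rest)
                       else t :: option_args rest)) := by
  induction args with
  | nil => intro prev; exact ⟨fun _ => rfl, fun _ _ _ => rfl⟩
  | cons t rest ih =>
    intro prev
    have H1 := (ih (some t)).1
    have H2 := (ih (some t)).2 t rfl
    constructor
    · intro hprev
      by_cases ht : PySem.Str.startswith t "--" = true
      · have h2 := H2 ht
        cases rest with
        | nil => simp_all [pvB', option_args]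
        | cons v rest' =>
          by_cases hv : PySem.Str.startswith v "--" = true <;>
            simp_all [pvB', option_args]
      · have htc : PySem.Chars.startswith t.toList ['-', '-'] = false := by simpa using ht
        have h1 := H1 (by simpa using ht)
        have hx : option_args (t :: rest) = option_args rest := by
          conv_lhs => unfold option_args
          simp [htc]
        simp_all [pvB']
    · intro p hp hflag
      subst hp
      by_cases ht : PySem.Str.startswith t "--" = true
      · have h2 := H2 ht
        cases rest with
        | nil => simp_all [pvB', option_args]
        | cons v rest' =>
          by_cases hv : PySem.Str.startswith v "--" = true <;>
            simp_all [pvB', option_args]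
      · have htc : PySem.Chars.startswith t.toList ['-', '-'] = false := by simpa using ht
        have h1 := H1 (by simpa using ht)
        simp_all [pvB']

-- ===== VERDICT (by name: the statement is the Claim_ definition above) =====
theorem option_args_spec : Claim_equal_option_args := by
  intro args _
  unfold Spec_option_args option_args_alt
  rw [pv_fold_eq args [] none]
  exact ((pv_key args none).1 rfl).symm
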